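-- pv_equiv track=rewrite | github.com/moon088/mahjong-ai | src/features/calculate_mentu_feature.py | convert_to_mahjong_hand
-- ===== SOURCE A (Python) =====
-- def convert_to_mahjong_hand(numbers):
--     suits = ['m', 'p', 's', 'z']
--     hand = {'m': [], 'p': [], 's': [], 'z': []}
--
--     for number in numbers:
--         if number < 9:
--             hand['m'].append(str(number + 1))
--         elif number < 18:
--             hand['p'].append(str(number - 8))
--         elif number < 27:
--             hand['s'].append(str(number - 17))
--         else:
--             hand['z'].append(str(number - 26))
--
--     hand_str = ''.join([f"{''.join(hand[suit])}{suit}" for suit in suits if hand[suit]])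
--     return hand_str
-- ===== SOURCE B (Python) =====
-- def convert_to_mahjong_hand(numbers):
--     def band(n):
--         if n < 9:
--             return 0
--         if n < 18:
--             return 1
--         if n < 27:
--             return 2
--         return 3
--
--     out = []
--     for k, suit in enumerate('mpsz'):
--         digits = [str(n - 9 * k + 1) for n in numbers if band(n) == k]
--         if digits:
--             out.append(''.join(digits) + suit)
--     return ''.join(out)
-- ===== Notes on version B (the rewrite author's own statement) =====
-- stated objective: idiomatic
-- what changed: B replaces A's single pass that buckets digits into a dict of four suit lists by a per-suit pass: for each suit it filters the numbers of that band and maps them with the uniform digit formula n - 9*k + 1, so no dict or mutation is needed.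
import Mathlib
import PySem

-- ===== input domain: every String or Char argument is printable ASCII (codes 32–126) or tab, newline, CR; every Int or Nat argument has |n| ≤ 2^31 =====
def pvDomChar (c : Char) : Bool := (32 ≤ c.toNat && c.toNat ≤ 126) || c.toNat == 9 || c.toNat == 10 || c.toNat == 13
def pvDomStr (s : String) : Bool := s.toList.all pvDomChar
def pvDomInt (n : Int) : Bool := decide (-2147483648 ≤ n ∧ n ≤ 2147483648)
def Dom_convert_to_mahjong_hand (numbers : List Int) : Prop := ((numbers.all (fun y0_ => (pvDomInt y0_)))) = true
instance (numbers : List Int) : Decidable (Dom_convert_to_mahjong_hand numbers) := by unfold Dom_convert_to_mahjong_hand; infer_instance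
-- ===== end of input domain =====

-- B replaces A's one-pass dict bucketing by a per-suit pass: for each suit it filters the
-- numbers of that band and maps them with the uniform digit formula n - 9*k + 1 (idiomatic).

-- ===== PORT A =====
-- the dict has four fixed literal keys, so it is represented exactly by a 4-tuple of its
-- values (keys never collide; the final comprehension iterates the fixed suits list)
def convert_to_mahjong_hand (numbers : List Int) : String :=
  let hand := numbers.foldl
    (fun (h : List String × List String × List String × List String) number =>
      if number < 9 then (h.1 ++ [PySem.Int.toStr (number + 1)], h.2.1, h.2.2.1, h.2.2.2)
      else if number < 18 then (h.1, h.2.1 ++ [PySem.Int.toStr (number - 8)], h.2.2.1, h.2.2.2)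
      else if number < 27 then (h.1, h.2.1, h.2.2.1 ++ [PySem.Int.toStr (number - 17)], h.2.2.2)
      else (h.1, h.2.1, h.2.2.1, h.2.2.2 ++ [PySem.Int.toStr (number - 26)]))
    ([], [], [], [])
  PySem.Str.join ""
    (([(hand.1, "m"), (hand.2.1, "p"), (hand.2.2.1, "s"), (hand.2.2.2, "z")]).filterMap
      (fun p => if p.1 ≠ [] then some (PySem.Str.join "" p.1 ++ p.2) else none))

-- ===== PORT B =====
def pvBand (n : Int) : Int :=
  if n < 9 then 0 else if n < 18 then 1 else if n < 27 then 2 else 3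

def convert_to_mahjong_hand_alt (numbers : List Int) : String :=
  let out := (PySem.List.enumerate "mpsz".toList).foldl
    (fun (acc : List String) ks =>
      let digits := (numbers.filter (fun n => pvBand n == ks.1)).map
        (fun n => PySem.Int.toStr (n - 9 * ks.1 + 1))
      if digits ≠ [] then acc ++ [PySem.Str.join "" digits ++ String.ofList [ks.2]] else acc)
    []
  PySem.Str.join "" out

-- ===== PRECONDITION & SPEC =====
def Spec_convert_to_mahjong_hand (numbers : List Int) (out : String) : Prop := out = convert_to_mahjong_hand_alt numbers
instance (numbers : List Int) (out : String) : Decidable (Spec_convert_to_mahjong_hand numbers out) := by unfold Spec_convert_to_mahjong_hand; infer_instance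

-- ===== CLAIM (what is proved, stated in full; the proofs are below) =====
def Claim_equal_convert_to_mahjong_hand : Prop := ∀ (numbers : List Int), Dom_convert_to_mahjong_hand numbers → Spec_convert_to_mahjong_hand numbers (convert_to_mahjong_hand numbers)

-- ===== LEMMAS AND PROOFS =====

-- the digits B collects for band k, as a named abbreviation for the proofs
def pvSel (numbers : List Int) (k : Int) : List String :=
  (numbers.filter (fun n => pvBand n == k)).map (fun n => PySem.Int.toStr (n - 9 * k + 1))

lemma pvFoldA (numbers : List Int) (a b c d : List String) :
    numbers.foldl
      (fun (h : List String × List String × List String × List String) number =>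
        if number < 9 then (h.1 ++ [PySem.Int.toStr (number + 1)], h.2.1, h.2.2.1, h.2.2.2)
        else if number < 18 then (h.1, h.2.1 ++ [PySem.Int.toStr (number - 8)], h.2.2.1, h.2.2.2)
        else if number < 27 then (h.1, h.2.1, h.2.2.1 ++ [PySem.Int.toStr (number - 17)], h.2.2.2)
        else (h.1, h.2.1, h.2.2.1, h.2.2.2 ++ [PySem.Int.toStr (number - 26)]))
      (a, b, c, d)
    = (a ++ pvSel numbers 0, b ++ pvSel numbers 1, c ++ pvSel numbers 2, d ++ pvSel numbers 3) := by
  induction numbers generalizing a b c d with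
  | nil => simp [pvSel]
  | cons n ns ih =>
    by_cases h9 : n < 9
    · have e1 : n + 1 = n - 9 * 0 + 1 := by ring
      simp [pvSel, pvBand, h9, ih, e1]
    · by_cases h18 : n < 18
      · have e1 : n - 8 = n - 9 * 1 + 1 := by ring
        simp [pvSel, pvBand, h9, h18, ih, e1]
      · by_cases h27 : n < 27
        · have e1 : n - 17 = n - 9 * 2 + 1 := by ring
          simp [pvSel, pvBand, h9, h18, h27, ih, e1]
        · have e1 : n - 26 = n - 9 * 3 + 1 := by ring
          simp [pvSel, pvBand, h9, h18, h27, ih, e1]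

-- ===== VERDICT (by name: the statement is the Claim_ definition above) =====
set_option maxHeartbeats 1600000 in
theorem convert_to_mahjong_hand_spec : Claim_equal_convert_to_mahjong_hand := by
  intro numbers _
  show convert_to_mahjong_hand numbers = convert_to_mahjong_hand_alt numbers
  unfold convert_to_mahjong_hand convert_to_mahjong_hand_alt
  rw [pvFoldA]
  have hm : String.ofList ['m'] = "m" := rfl
  have hp : String.ofList ['p'] = "p" := rfl
  have hs : String.ofList ['s'] = "s" := rfl
  have hz : String.ofList ['z'] = "z" := rfl
  have hlist : "mpsz".toList = ['m', 'p', 's', 'z'] := rfl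
  simp only [hlist, PySem.List.enumerate_cons, PySem.List.enumerate_nil, List.foldl_cons,
    List.foldl_nil, List.filterMap, List.nil_append, pvSel, hm, hp, hs, hz]
  norm_num
  split_ifs <;> norm_num
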